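-- pv_equiv track=rewrite | github.com/Acr05s/project-doc-manager | app/services/scheduled_report_service.py | _get_ordered_cycles
-- ===== SOURCE A (Python) =====
-- from typing import Any, Dict, List, Optional, Tuple
--
-- def _get_ordered_cycles(project: Dict[str, Any], docs: Dict[str, Any]) -> List[str]:
--     ordered: List[str] = []
--     seen = set()
--
--     for cycle in project.get('cycles', []) or []:
--         c = str(cycle or '').strip()
--         if not c or c in seen:
--             continue
--         seen.add(c)
--         ordered.append(c)
--
--     for cycle in docs.keys():
--         c = str(cycle or '').strip()
--         if not c or c in seen:
--             continue
--         seen.add(c)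
--         ordered.append(c)
--
--     return ordered
-- ===== SOURCE B (Python) =====
-- def _dedup(xs):
--     # erase-ahead dedup: take the head, then delete every later copy of it
--     out = []
--     while xs:
--         h = xs[0]
--         out.append(h)
--         xs = [x for x in xs[1:] if x != h]
--     return out
--
-- def _get_ordered_cycles(project, docs):
--     items = [str(c or '').strip() for c in (project.get('cycles', []) or [])]
--     items += [str(c or '').strip() for c in docs.keys()]
--     return _dedup([c for c in items if c])
-- ===== Notes on version B (the rewrite author's own statement) =====
-- stated objective: alternative
-- what changed: Instead of a forward pass with a seen-set and a membership branch, B normalizes both sources into one list, filters out empties, and deduplicates by an erase-ahead loop that repeatedly takes the head and deletes all its later copies from the remainder.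
import Mathlib
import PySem

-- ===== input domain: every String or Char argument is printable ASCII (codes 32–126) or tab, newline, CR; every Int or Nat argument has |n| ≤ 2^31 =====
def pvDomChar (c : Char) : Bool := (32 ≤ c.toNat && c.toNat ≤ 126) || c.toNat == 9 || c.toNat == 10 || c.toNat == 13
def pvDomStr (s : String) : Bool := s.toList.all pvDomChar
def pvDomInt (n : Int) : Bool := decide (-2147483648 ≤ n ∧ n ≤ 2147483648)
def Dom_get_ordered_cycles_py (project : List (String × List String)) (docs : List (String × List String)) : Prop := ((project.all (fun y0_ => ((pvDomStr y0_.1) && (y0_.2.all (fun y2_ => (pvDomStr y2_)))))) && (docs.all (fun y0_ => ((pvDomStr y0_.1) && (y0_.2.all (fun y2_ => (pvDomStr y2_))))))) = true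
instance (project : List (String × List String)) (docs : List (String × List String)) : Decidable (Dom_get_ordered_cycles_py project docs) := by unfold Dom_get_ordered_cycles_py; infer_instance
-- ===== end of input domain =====

-- B deduplicates by an erase-ahead loop (take head, delete later copies) over one
-- normalized filtered list, instead of A's seen-set + membership-branch forward pass.


-- ===== PORT A =====
-- the loop body shared by A's two for-loops: normalize, skip empty/seen, else record in both
def pvStepA (st : List String × PySem.Set String) (cycle : String) : List String × PySem.Set String :=
  let c := PySem.Str.strip cycle
  if c = "" ∨ PySem.Set.contains st.2 c then st
  else (st.1 ++ [c], PySem.Set.add st.2 c)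

def get_ordered_cycles_py (project : List (String × List String)) (docs : List (String × List String)) : List String :=
  let cycles := (PySem.Dict.ofList project).getD "cycles" []
  let st1 := cycles.foldl pvStepA ([], PySem.Set.empty)
  let st2 := ((PySem.Dict.ofList docs).keys).foldl pvStepA st1
  st2.1

-- ===== PORT B =====
-- Source B's while-loop: out accumulates the head, the remainder is the tail with the head's copies erased
def pvDedup : List String → List String
  | [] => []
  | h :: t => h :: pvDedup (t.filter (fun x => x ≠ h))
termination_by l => l.length
decreasing_by
  simp only [List.length_unattach, List.length_cons]
  exact Nat.lt_succ_of_le (le_trans (List.length_filter_le _ _) (by simp))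

def get_ordered_cycles_py_alt (project : List (String × List String)) (docs : List (String × List String)) : List String :=
  let items := ((PySem.Dict.ofList project).getD "cycles" []).map PySem.Str.strip
             ++ ((PySem.Dict.ofList docs).keys).map PySem.Str.strip
  pvDedup (items.filter (fun c => c ≠ ""))

-- ===== PRECONDITION & SPEC =====
def Spec_get_ordered_cycles_py (project : List (String × List String)) (docs : List (String × List String)) (out : List String) : Prop := out = get_ordered_cycles_py_alt project docs
instance (project : List (String × List String)) (docs : List (String × List String)) (out : List String) : Decidable (Spec_get_ordered_cycles_py project docs out) := by unfold Spec_get_ordered_cycles_py; infer_instance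

-- ===== CLAIM (what is proved, stated in full; the proofs are below) =====
def Claim_equal_get_ordered_cycles_py : Prop := ∀ (project : List (String × List String)) (docs : List (String × List String)), Dom_get_ordered_cycles_py project docs → Spec_get_ordered_cycles_py project docs (get_ordered_cycles_py project docs)

-- ===== LEMMAS AND PROOFS =====
theorem pvDedup_nil : pvDedup [] = [] := by simp [pvDedup.eq_def]

theorem pvDedup_cons (h : String) (t : List String) :
    pvDedup (h :: t) = h :: pvDedup (t.filter (fun x => x ≠ h)) := by
  rw [pvDedup.eq_def]

-- the one-list collapse of A's loop body (proof-side helper)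
def pvGA (acc : List String) (cycle : String) : List String :=
  let c := PySem.Str.strip cycle
  if c = "" then acc else PySem.Set.add acc c

theorem pvStepA_eq_pair (a : List String) (c : String) :
    pvStepA (a, a) c = (pvGA a c, pvGA a c) := by
  unfold pvStepA pvGA PySem.Set.add
  by_cases h1 : PySem.Str.strip c = "" <;> by_cases h2 : PySem.Str.strip c ∈ a <;>
    simp [h1, h2]

-- A's state always has seen = ordered (as lists), so the pair fold collapses to one list fold
theorem pvFoldA_pair (l : List String) (a : List String) :
    l.foldl pvStepA (a, a) = (l.foldl pvGA a, l.foldl pvGA a) := by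
  induction l generalizing a with
  | nil => rfl
  | cons x xs ih => simp [List.foldl_cons, pvStepA_eq_pair, ih]

-- folding pvGA is folding Set.add over the stripped, empty-filtered stream
theorem pvFoldGA (l : List String) (a : List String) :
    l.foldl pvGA a = ((l.map PySem.Str.strip).filter (fun c => c ≠ "")).foldl PySem.Set.add a := by
  induction l generalizing a with
  | nil => rfl
  | cons x xs ih =>
      by_cases h : PySem.Str.strip x = "" <;> simp [List.foldl_cons, pvGA, h, ih]

-- the seen-set fold equals the erase-ahead dedup of the part not already seen
theorem pvFold_add_eq_dedup (l : List String) (a : List String) :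
    l.foldl PySem.Set.add a = a ++ pvDedup (l.filter (fun x => x ∉ a)) := by
  induction l generalizing a with
  | nil => simp [pvDedup_nil]
  | cons h t ih =>
      by_cases hm : h ∈ a
      · simpa [List.foldl_cons, PySem.Set.add, hm] using ih a
      · have key : (t.filter (fun x => x ∉ a)).filter (fun x => x ≠ h)
            = t.filter (fun x => x ∉ a ++ [h]) := by
          rw [List.filter_filter]
          apply List.filter_congr
          intro x _
          simp [List.mem_append, and_comm, eq_comm]
        calc (h :: t).foldl PySem.Set.add a
            = t.foldl PySem.Set.add (a ++ [h]) := by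
              simp [List.foldl_cons, PySem.Set.add, hm]
          _ = (a ++ [h]) ++ pvDedup (t.filter (fun x => x ∉ a ++ [h])) := ih (a ++ [h])
          _ = a ++ pvDedup ((h :: t).filter (fun x => x ∉ a)) := by
              rw [← key]
              simp only [List.filter_cons, List.append_assoc, List.singleton_append]
              simp [pvDedup_cons, hm]

-- ===== VERDICT (by name: the statement is the Claim_ definition above) =====
theorem get_ordered_cycles_py_spec : Claim_equal_get_ordered_cycles_py := by
  intro project docs _
  unfold Spec_get_ordered_cycles_py get_ordered_cycles_py get_ordered_cycles_py_alt
  simp only [← List.foldl_append]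
  rw [show (PySem.Set.empty : PySem.Set String) = ([] : List String) from rfl]
  rw [pvFoldA_pair, pvFoldGA, pvFold_add_eq_dedup]
  simp [List.filter_append]
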